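-- pv_equiv track=rewrite | github.com/SuLab/DrugMechDB | parse.py | add_md_hyperlink
-- ===== SOURCE A (Python) =====
-- def add_md_hyperlink(text):
--     # Split across spaces to separate words
--     text_split = text.split(' ')
--     out_text = []
--
--     # check each word to see if it's a hyperlink
--     # (current logic is very basic, just checks for http)
--     for word in text_split:
--         if word.startswith('http'):
--             out_text.append('['+ word +'](' + word + ')')
--         else:
--             out_text.append(word)
--     return ' '.join(out_text)
-- ===== SOURCE B (Python) =====
-- def _wrap(w):
--     return '[' + w + '](' + w + ')' if w.startswith('http') else w
--
--
-- def add_md_hyperlink(text):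
--     # Single left-to-right scan: accumulate the current word character by
--     # character and emit it (wrapped if it starts with 'http') at each space
--     # and at the end.  No intermediate token list is built.
--     out = ''
--     cur = ''
--     for ch in text:
--         if ch == ' ':
--             out += _wrap(cur) + ' '
--             cur = ''
--         else:
--             cur += ch
--     return out + _wrap(cur)
-- ===== Notes on version B (the rewrite author's own statement) =====
-- stated objective: alternative
-- what changed: Replaced split(' ')/per-word loop/join with a single character-by-character scan that accumulates the current word and emits it (wrapped if it starts with 'http') at each space and at the end, building the output directly with no intermediate token list.
import Mathlib
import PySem

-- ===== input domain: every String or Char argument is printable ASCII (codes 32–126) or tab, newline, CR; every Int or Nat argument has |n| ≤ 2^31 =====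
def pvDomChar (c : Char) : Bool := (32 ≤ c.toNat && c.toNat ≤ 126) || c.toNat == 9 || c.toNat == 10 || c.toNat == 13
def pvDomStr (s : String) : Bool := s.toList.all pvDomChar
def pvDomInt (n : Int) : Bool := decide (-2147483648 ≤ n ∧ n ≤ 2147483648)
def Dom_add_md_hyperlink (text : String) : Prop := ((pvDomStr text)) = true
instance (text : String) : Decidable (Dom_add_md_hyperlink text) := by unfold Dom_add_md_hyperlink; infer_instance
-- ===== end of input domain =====

-- B replaces A's split/map/join pipeline by a single character scan that emits each word
-- (wrapped if it starts with 'http') at each space and at the end; objective: alternative.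


-- ===== PORT A =====
-- text.split(' '); per-word loop appending the wrapped/plain word; ' '.join(out).
def add_md_hyperlink (text : String) : String :=
  let text_split := PySem.Chars.splitOn text.toList [' ']
  let out_text := text_split.foldl (fun acc word =>
      if PySem.Chars.startswith word ['h','t','t','p'] then
        acc ++ ['[' :: word ++ ']' :: '(' :: word ++ [')']]
      else
        acc ++ [word]) []
  String.ofList (PySem.Chars.join [' '] out_text)

-- ===== PORT B =====
-- helper _wrap of Source B
def pvWrapB (w : List Char) : List Char :=
  if PySem.Chars.startswith w ['h','t','t','p'] then
    '[' :: w ++ ']' :: '(' :: w ++ [')']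
  else
    w

-- single scan with state (out, cur); flush cur at each space and at the end
def add_md_hyperlink_alt (text : String) : String :=
  let p := text.toList.foldl (fun (st : List Char × List Char) ch =>
      if ch = ' ' then (st.1 ++ pvWrapB st.2 ++ [' '], ([] : List Char))
      else (st.1, st.2 ++ [ch])) ([], [])
  String.ofList (p.1 ++ pvWrapB p.2)

-- ===== PRECONDITION & SPEC =====
def Spec_add_md_hyperlink (text : String) (out : String) : Prop := out = add_md_hyperlink_alt text
instance (text : String) (out : String) : Decidable (Spec_add_md_hyperlink text out) := by unfold Spec_add_md_hyperlink; infer_instance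

-- ===== CLAIM (what is proved, stated in full; the proofs are below) =====
def Claim_equal_add_md_hyperlink : Prop := ∀ (text : String), Dom_add_md_hyperlink text → Spec_add_md_hyperlink text (add_md_hyperlink text)

-- ===== LEMMAS AND PROOFS =====

-- reference splitter: split on spaces, keeping empty pieces (always nonempty)
def pvMergeFirst (pre : List Char) : List (List Char) → List (List Char)
  | [] => [pre]
  | w :: ws => (pre ++ w) :: ws

def pvSplitSp : List Char → List (List Char)
  | [] => [[]]
  | c :: r => if c = ' ' then [] :: pvSplitSp r else pvMergeFirst [c] (pvSplitSp r)

theorem pvSplitSp_ne_nil (l : List Char) : pvSplitSp l ≠ [] := by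
  cases l with
  | nil => simp [pvSplitSp]
  | cons c r =>
    simp only [pvSplitSp]
    split
    · simp
    · cases h : pvSplitSp r <;> simp [pvMergeFirst]

theorem pvMergeFirst_merge (a b : List Char) (xs : List (List Char)) :
    pvMergeFirst a (pvMergeFirst b xs) = pvMergeFirst (a ++ b) xs := by
  cases xs <;> simp [pvMergeFirst]

theorem pvSplitOn_go_spec (fuel : Nat) (l cur : List Char) (acc : List (List Char))
    (h : l.length < fuel) :
    PySem.Chars.splitOn.go [' '] fuel l cur acc
      = acc.reverse ++ pvMergeFirst cur.reverse (pvSplitSp l) := by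
  induction fuel generalizing l cur acc with
  | zero => omega
  | succ n ih =>
    cases l with
    | nil =>
      simp [PySem.Chars.splitOn.go, pvSplitSp, pvMergeFirst]
    | cons c rest =>
      simp only [PySem.Chars.splitOn.go]
      by_cases hc : c = ' '
      · subst hc
        have hp : List.isPrefixOf [' '] (' ' :: rest) = true := by
          simp [List.isPrefixOf]
        rw [if_pos hp]
        have := ih rest [] (cur.reverse :: acc)
            (by simpa using Nat.lt_of_succ_lt_succ h)
        simp only [List.length_cons, List.length_nil, List.drop_succ_cons, List.drop_zero]
        rw [this]
        cases hs : pvSplitSp rest with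
        | nil => exact absurd hs (pvSplitSp_ne_nil rest)
        | cons w ws =>
          simp [pvSplitSp, pvMergeFirst, hs]
      · have hp : List.isPrefixOf [' '] (c :: rest) = false := by
          simp [List.isPrefixOf]
          exact fun h' => (hc h'.symm).elim
        rw [if_neg (by simp [hp])]
        rw [ih rest (c :: cur) acc (by simpa using Nat.lt_of_succ_lt_succ h)]
        have : pvSplitSp (c :: rest) = pvMergeFirst [c] (pvSplitSp rest) := by
          simp [pvSplitSp, hc]
        rw [this, pvMergeFirst_merge]
        simp

theorem pvSplitOn_eq (l : List Char) :
    PySem.Chars.splitOn l [' '] = pvSplitSp l := by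
  have := pvSplitOn_go_spec (l.length + 1) l [] [] (by omega)
  simp only [PySem.Chars.splitOn, this, List.reverse_nil, List.nil_append]
  cases h : pvSplitSp l with
  | nil => exact absurd h (pvSplitSp_ne_nil l)
  | cons w ws => simp [pvMergeFirst]

-- A's accumulating loop is map pvWrapB
theorem pvFoldA_eq_map (ws : List (List Char)) (acc : List (List Char)) :
    ws.foldl (fun acc word =>
      if PySem.Chars.startswith word ['h','t','t','p'] then
        acc ++ ['[' :: word ++ ']' :: '(' :: word ++ [')']]
      else
        acc ++ [word]) acc = acc ++ ws.map pvWrapB := by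
  induction ws generalizing acc with
  | nil => simp
  | cons w ws ih =>
    simp only [List.foldl_cons, List.map_cons, ih, pvWrapB]
    split <;> simp

-- B's scan computes the join of the wrapped words of the remaining input,
-- with `cur` the pending word prefix and `out` the emitted output
theorem pvFoldB_spec (l : List Char) (out cur : List Char) :
    (let p := l.foldl (fun (st : List Char × List Char) ch =>
        if ch = ' ' then (st.1 ++ pvWrapB st.2 ++ [' '], ([] : List Char))
        else (st.1, st.2 ++ [ch])) (out, cur)
     p.1 ++ pvWrapB p.2)
      = out ++ PySem.Chars.join [' '] ((pvMergeFirst cur (pvSplitSp l)).map pvWrapB) := by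
  induction l generalizing out cur with
  | nil =>
    simp [pvSplitSp, pvMergeFirst, PySem.Chars.join, List.intercalate]
  | cons c rest ih =>
    by_cases hc : c = ' '
    · subst hc
      simp only [List.foldl_cons, if_pos]
      rw [ih]
      cases hs : pvSplitSp rest with
      | nil => exact absurd hs (pvSplitSp_ne_nil rest)
      | cons w ws =>
        simp [pvSplitSp, pvMergeFirst, hs, PySem.Chars.join, List.intercalate]
    · simp only [List.foldl_cons, if_neg hc]
      rw [ih]
      have : pvSplitSp (c :: rest) = pvMergeFirst [c] (pvSplitSp rest) := by
        simp [pvSplitSp, hc]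
      rw [this, pvMergeFirst_merge]

-- ===== VERDICT (by name: the statement is the Claim_ definition above) =====
theorem add_md_hyperlink_spec : Claim_equal_add_md_hyperlink := by
  intro text _
  unfold Spec_add_md_hyperlink add_md_hyperlink add_md_hyperlink_alt
  simp only [pvSplitOn_eq, pvFoldA_eq_map, List.nil_append]
  rw [pvFoldB_spec]
  cases h : pvSplitSp text.toList with
  | nil => exact absurd h (pvSplitSp_ne_nil text.toList)
  | cons w ws => simp [pvMergeFirst]
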